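-- pv_equiv track=rewrite | github.com/Barcol/studia | MPF2/main.py | create_array
-- ===== SOURCE A (Python) =====
-- def create_array(length, value_one, value_two):
--     array = []
--     half_length = int(length / 2)
--     for number in range(length):
--         if number < half_length:
--             array.append(value_one)
--         else:
--             array.append(value_two)
--     return array
-- ===== SOURCE B (Python) =====
-- def create_array(length, value_one, value_two):
--     left = []
--     right = []
--     remaining = length
--     while remaining >= 2:
--         left.append(value_one)
--         right.append(value_two)
--         remaining -= 2
--     if remaining == 1:
--         right.append(value_two)
--     return left + right
-- ===== Notes on version B (the rewrite author's own statement) =====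
-- stated objective: alternative
-- what changed: B pairs elements off from both ends of the result, growing a left and a right accumulator while consuming the length two at a time, so no half-way point is ever computed and no per-element index comparison is made; A loops over range(length) testing each index against a precomputed half.
import Mathlib
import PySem

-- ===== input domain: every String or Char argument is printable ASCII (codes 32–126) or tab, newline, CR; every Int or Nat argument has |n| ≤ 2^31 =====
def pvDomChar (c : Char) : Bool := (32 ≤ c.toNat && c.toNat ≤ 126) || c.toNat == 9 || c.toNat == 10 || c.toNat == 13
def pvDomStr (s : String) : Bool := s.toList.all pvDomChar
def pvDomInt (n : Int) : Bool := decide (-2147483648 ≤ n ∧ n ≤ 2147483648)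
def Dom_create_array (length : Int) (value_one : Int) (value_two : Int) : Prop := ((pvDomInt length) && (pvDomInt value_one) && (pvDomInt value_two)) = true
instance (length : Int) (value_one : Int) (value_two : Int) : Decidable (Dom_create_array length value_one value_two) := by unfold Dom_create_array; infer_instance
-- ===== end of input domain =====

-- B pairs elements off from both ends with two accumulators, consuming the length two at a time,
-- instead of A's indexed loop comparing each position against a precomputed half (alternative algorithm; return value only).
-- ===== PORT A =====
-- int(length / 2): float division then truncation toward zero; exact for |length| <= 2^31, so Int.tdiv.
def create_array (length : Int) (value_one : Int) (value_two : Int) : List Int :=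
  let half_length : Int := length.tdiv 2
  (PySem.List.pyRange 0 length 1).foldl
    (fun array number => if number < half_length then array ++ [value_one] else array ++ [value_two]) []

-- ===== PORT B =====
-- the while loop of Source B: state (remaining, left, right), decrementing remaining by 2
def create_array_loop (value_one value_two : Int) (remaining : Int)
    (left right : List Int) : Int × List Int × List Int :=
  if 2 ≤ remaining then
    create_array_loop value_one value_two (remaining - 2) (left ++ [value_one]) (right ++ [value_two])
  else
    (remaining, left, right)
termination_by remaining.toNat
decreasing_by omega

def create_array_alt (length : Int) (value_one : Int) (value_two : Int) : List Int :=
  let s := create_array_loop value_one value_two length [] []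
  let right := if s.1 = 1 then s.2.2 ++ [value_two] else s.2.2
  s.2.1 ++ right

-- ===== PRECONDITION & SPEC =====
def Spec_create_array (length : Int) (value_one : Int) (value_two : Int) (out : List Int) : Prop := out = create_array_alt length value_one value_two
instance (length : Int) (value_one : Int) (value_two : Int) (out : List Int) : Decidable (Spec_create_array length value_one value_two out) := by unfold Spec_create_array; infer_instance

-- ===== CLAIM (what is proved, stated in full; the proofs are below) =====
def Claim_equal_create_array : Prop := ∀ (length : Int) (value_one : Int) (value_two : Int), Dom_create_array length value_one value_two → Spec_create_array length value_one value_two (create_array length value_one value_two)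

-- ===== LEMMAS AND PROOFS =====

-- number of loop iterations for an initial remaining of n
def pairCnt (n : Int) : Nat := if 2 ≤ n then (n / 2).toNat else 0

lemma tdiv_two (n : Int) : n.tdiv 2 = if 0 ≤ n then n / 2 else -((-n) / 2) := by
  split
  · exact Int.tdiv_eq_ediv_of_nonneg (by assumption)
  · rw [← Int.neg_neg n, Int.neg_tdiv, Int.tdiv_eq_ediv_of_nonneg (by omega), Int.neg_neg]

lemma create_array_loop_eq (v1 v2 : Int) (n : Int) (l r : List Int) :
    create_array_loop v1 v2 n l r
      = (n - 2 * pairCnt n, l ++ List.replicate (pairCnt n) v1, r ++ List.replicate (pairCnt n) v2) := by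
  induction n, l, r using create_array_loop.induct v1 v2 with
  | case1 n l r h ih =>
    rw [create_array_loop, if_pos h, ih]
    have hc : pairCnt n = pairCnt (n - 2) + 1 := by
      simp only [pairCnt]
      split <;> split <;> omega
    simp [hc, List.replicate_succ, List.append_assoc]
    omega
  | case2 n l r h =>
    have hc : pairCnt n = 0 := by simp only [pairCnt]; split <;> omega
    rw [create_array_loop, if_neg h]
    simp [hc]

-- B in closed form: two replicate blocks
lemma create_array_alt_closed (length v1 v2 : Int) :
    create_array_alt length v1 v2
      = List.replicate (length.tdiv 2).toNat v1
          ++ List.replicate (length - length.tdiv 2).toNat v2 := by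
  unfold create_array_alt
  rw [create_array_loop_eq]
  simp only [List.nil_append]
  rcases (by omega : length ≤ 1 ∨ 2 ≤ length) with h | h
  · have hc : pairCnt length = 0 := by simp only [pairCnt]; split <;> omega
    have htd := tdiv_two length
    have h1 : (length.tdiv 2).toNat = 0 := by split at htd <;> omega
    have h2 : (length - length.tdiv 2).toNat = if length = 1 then 1 else 0 := by
      split at htd <;> split <;> omega
    split <;> simp_all
  · have htd : length.tdiv 2 = length / 2 := Int.tdiv_eq_ediv_of_nonneg (by omega)
    have hc : pairCnt length = (length / 2).toNat := by simp only [pairCnt]; rw [if_pos h]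
    rw [hc, htd]
    have hrem : length - 2 * ((length / 2).toNat : Int) = length % 2 := by omega
    rw [hrem]
    have h2 : (length - length / 2).toNat = (length / 2).toNat + (if length % 2 = 1 then 1 else 0) := by
      split <;> omega
    rw [h2]
    split
    · simp [List.replicate_succ', List.append_assoc]
    · simp

-- A in the same closed form (reused from the loop-free characterisation of A's fold)
lemma range_map_ite_eq_replicate (n m : Nat) (hm : m ≤ n) (v1 v2 : Int) :
    (List.range n).map (fun k => if k < m then v1 else v2)
      = List.replicate m v1 ++ List.replicate (n - m) v2 := by
  obtain ⟨d, rfl⟩ := Nat.exists_eq_add_of_le hm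
  rw [List.range_add, List.map_append, List.map_map]
  have h1 : (List.range m).map (fun k => if k < m then v1 else v2) = List.replicate m v1 := by
    rw [List.eq_replicate_iff]
    refine ⟨by simp, ?_⟩
    intro x hx
    obtain ⟨k, hk, rfl⟩ := List.mem_map.mp hx
    simp only [List.mem_range] at hk
    simp [hk]
  have h2 : (List.range d).map ((fun k => if k < m then v1 else v2) ∘ (m + ·)) = List.replicate d v2 := by
    rw [List.eq_replicate_iff]
    refine ⟨by simp, ?_⟩
    intro x hx
    obtain ⟨k, hk, rfl⟩ := List.mem_map.mp hx
    simp [Nat.not_lt.mpr (Nat.le_add_right m k)]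
  rw [h1, h2, Nat.add_sub_cancel_left]

lemma create_array_closed (length v1 v2 : Int) :
    create_array length v1 v2
      = List.replicate (length.tdiv 2).toNat v1
          ++ List.replicate (length - length.tdiv 2).toNat v2 := by
  unfold create_array
  rcases (by omega : length ≤ 0 ∨ 0 < length) with hL | hL
  · have h1 : PySem.List.pyRange 0 length 1 = [] := PySem.List.pyRange_one_eq_nil hL
    have htd := tdiv_two length
    have h3 : (length - length.tdiv 2).toNat = 0 := by split at htd <;> omega
    have h4 : (length.tdiv 2).toNat = 0 := by split at htd <;> omega
    simp [h1, h3, h4]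
  · have hd : length.tdiv 2 = length / 2 := Int.tdiv_eq_ediv_of_nonneg (le_of_lt hL)
    have hfold : ∀ (l : List Int) (acc : List Int) (h : Int),
        l.foldl (fun array number => if number < h then array ++ [v1] else array ++ [v2]) acc
          = acc ++ l.map (fun number => if number < h then v1 else v2) := by
      intro l
      induction l with
      | nil => simp
      | cons x xs ih => intro acc h; simp only [List.foldl_cons, List.map_cons, ih]; split <;> simp
    rw [hfold, List.nil_append, PySem.List.pyRange_one, List.map_map]
    have hmc : (List.range (length - 0).toNat).map
          ((fun number => if number < length.tdiv 2 then v1 else v2) ∘ (fun k : Nat => 0 + (k : Int)))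
        = (List.range (length - 0).toNat).map
          (fun k => if k < (length.tdiv 2).toNat then v1 else v2) := by
      apply List.map_congr_left
      intro k _
      simp only [Function.comp, Int.zero_add]
      by_cases hk : (k : Int) < length.tdiv 2
      · rw [if_pos hk, if_pos (by omega)]
      · rw [if_neg hk, if_neg (by omega)]
    rw [hmc, range_map_ite_eq_replicate _ _ (by rw [hd]; omega)]
    congr 2
    rw [hd]; omega

-- ===== VERDICT (by name: the statement is the Claim_ definition above) =====
theorem create_array_spec : Claim_equal_create_array := by
  intro length value_one value_two _
  unfold Spec_create_array
  rw [create_array_closed, create_array_alt_closed]
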